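-- pv_equiv track=rewrite | github.com/dafvid/atrafaweb | atrafadata/__init__.py | dict_range
-- ===== SOURCE A (Python) =====
-- def dict_range(start, end):
--     sx, sz = start
--     ex, ez = end
--     if sx > ex:
--         sx, ex = ex, sx
--     if sz > ez:
--         sz, ez = ez, sz
--     xd = ex - sx
--     zd = ez - sz
--
--     xr = range(xd + 1)
--     if not xr:
--         xr = [0]
--
--     zr = range(zd + 1)
--     if not zr:
--         zr = [0]
--     for x in xr:
--         for z in zr:
--             yield sx + x, sz + z
-- ===== SOURCE B (Python) =====
-- def dict_range(start, end):
--     (sx, sz), (ex, ez) = start, end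
--     sx, ex = min(sx, ex), max(sx, ex)
--     sz, ez = min(sz, ez), max(sz, ez)
--     w = ez - sz + 1
--     for i in range((ex - sx + 1) * w):
--         x, z = divmod(i, w)
--         yield sx + x, sz + z
-- ===== Notes on version B (the rewrite author's own statement) =====
-- stated objective: alternative
-- what changed: Replaces the nested x/z double loop with a single flat loop over (xd+1)*(zd+1) indices decomposed by divmod, and normalizes the corners with min/max instead of conditional swaps; the dead 'if not xr' branches are dropped.
import Mathlib
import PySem

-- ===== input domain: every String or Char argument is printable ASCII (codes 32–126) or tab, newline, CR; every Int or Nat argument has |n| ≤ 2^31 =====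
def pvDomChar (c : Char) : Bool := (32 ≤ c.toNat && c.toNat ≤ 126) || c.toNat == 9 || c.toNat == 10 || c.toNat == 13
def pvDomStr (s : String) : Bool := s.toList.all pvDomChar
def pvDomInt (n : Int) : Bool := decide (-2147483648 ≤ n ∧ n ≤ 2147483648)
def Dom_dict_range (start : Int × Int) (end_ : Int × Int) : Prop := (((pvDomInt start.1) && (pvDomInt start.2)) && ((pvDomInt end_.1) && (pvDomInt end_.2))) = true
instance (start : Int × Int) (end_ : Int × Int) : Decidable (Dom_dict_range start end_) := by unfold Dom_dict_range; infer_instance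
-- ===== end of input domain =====

-- B flattens A's nested x/z loops into one divmod-indexed pass (alternative decomposition, same cost).
-- A is a generator; both ports return the list of yielded pairs.

-- ===== PORT A =====
-- literal transliteration of A: conditional swaps, ranges with the (dead) empty-range fallback,
-- nested for-loops yielding pairs (outer x, inner z) = flatMap of maps.
def dict_range (start : Int × Int) (end_ : Int × Int) : List (Int × Int) :=
  let sx0 := start.1; let sz0 := start.2
  let ex0 := end_.1; let ez0 := end_.2
  let sx := if sx0 > ex0 then ex0 else sx0
  let ex := if sx0 > ex0 then sx0 else ex0
  let sz := if sz0 > ez0 then ez0 else sz0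
  let ez := if sz0 > ez0 then sz0 else ez0
  let xd := ex - sx
  let zd := ez - sz
  let xr := PySem.List.pyRange 0 (xd + 1) 1
  let xr := if xr = [] then [(0 : Int)] else xr
  let zr := PySem.List.pyRange 0 (zd + 1) 1
  let zr := if zr = [] then [(0 : Int)] else zr
  xr.flatMap (fun x => zr.map (fun z => (sx + x, sz + z)))

-- ===== PORT B =====
-- literal transliteration of Source B: min/max normalization, one flat range, divmod decomposition.
def dict_range_alt (start : Int × Int) (end_ : Int × Int) : List (Int × Int) :=
  let sx := min start.1 end_.1
  let ex := max start.1 end_.1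
  let sz := min start.2 end_.2
  let ez := max start.2 end_.2
  let w := ez - sz + 1
  (PySem.List.pyRange 0 ((ex - sx + 1) * w) 1).map
    (fun i => (sx + PySem.Int.floordiv i w, sz + PySem.Int.mod i w))

-- ===== PRECONDITION & SPEC =====
def Spec_dict_range (start : Int × Int) (end_ : Int × Int) (out : List (Int × Int)) : Prop := out = dict_range_alt start end_
instance (start : Int × Int) (end_ : Int × Int) (out : List (Int × Int)) : Decidable (Spec_dict_range start end_ out) := by unfold Spec_dict_range; infer_instance

-- ===== CLAIM (what is proved, stated in full; the proofs are below) =====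
def Claim_equal_dict_range : Prop := ∀ (start : Int × Int) (end_ : Int × Int), Dom_dict_range start end_ → Spec_dict_range start end_ (dict_range start end_)

-- ===== LEMMAS AND PROOFS =====

-- one band of the flat range equals one inner pass of the nested loops
lemma band_eq (sx sz m : Int) (hm : 0 < m) (n : Nat) :
    (PySem.List.pyRange ((n : Int) * m) (((n : Int) + 1) * m) 1).map
        (fun i => (sx + PySem.Int.floordiv i m, sz + PySem.Int.mod i m))
      = (PySem.List.pyRange 0 m 1).map (fun z => (sx + (n : Int), sz + z)) := by
  rw [PySem.List.pyRange_one, PySem.List.pyRange_one]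
  have hlen : (((n : Int) + 1) * m - (n : Int) * m).toNat = (m - 0).toNat := by
    congr 1; ring_nf
  rw [hlen, List.map_map, List.map_map]
  refine List.map_congr_left (fun k hk => ?_)
  have hk' : (k : Int) < m := by
    have := List.mem_range.mp hk
    omega
  have hk0 : (0 : Int) ≤ (k : Int) := Int.natCast_nonneg k
  have hdiv : PySem.Int.floordiv ((n : Int) * m + (k : Int)) m = (n : Int) := by
    rw [PySem.Int.floordiv_eq_ediv_of_pos hm]
    rw [Int.add_comm, Int.add_mul_ediv_right _ _ (by omega : m ≠ 0),
        Int.ediv_eq_zero_of_lt hk0 hk']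
    ring
  have hmod : PySem.Int.mod ((n : Int) * m + (k : Int)) m = (k : Int) := by
    rw [PySem.Int.mod_eq_emod_of_pos hm, Int.add_comm, Int.add_mul_emod_self_right]
    exact Int.emod_eq_of_lt hk0 hk'
  simp [hdiv, hmod]

-- nested loops = flat divmod loop, for rectangle n × m
lemma block_eq (sx sz m : Int) (hm : 0 < m) (n : Nat) :
    ((PySem.List.pyRange 0 (n : Int) 1).flatMap
        (fun x => (PySem.List.pyRange 0 m 1).map (fun z => (sx + x, sz + z))))
      = (PySem.List.pyRange 0 ((n : Int) * m) 1).map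
          (fun i => (sx + PySem.Int.floordiv i m, sz + PySem.Int.mod i m)) := by
  induction n with
  | zero => simp [PySem.List.pyRange_one_eq_nil]
  | succ n ih =>
      have h1 : PySem.List.pyRange 0 ((n + 1 : Nat) : Int) 1
          = PySem.List.pyRange 0 (n : Int) 1 ++ [(n : Int)] := by
        push_cast
        exact PySem.List.pyRange_one_succ_right (by positivity)
      have h2 : PySem.List.pyRange 0 (((n + 1 : Nat) : Int) * m) 1
          = PySem.List.pyRange 0 ((n : Int) * m) 1
            ++ PySem.List.pyRange ((n : Int) * m) (((n : Int) + 1) * m) 1 := by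
        push_cast
        exact PySem.List.pyRange_one_append 0 ((n : Int) * m) (((n : Int) + 1) * m)
          (by positivity) (by nlinarith)
      rw [h1, h2, List.flatMap_append, List.map_append, ih, band_eq sx sz m hm n]
      simp

theorem dict_range_spec : Claim_equal_dict_range := by
  intro start end_ _
  unfold Spec_dict_range dict_range dict_range_alt
  obtain ⟨sx0, sz0⟩ := start
  obtain ⟨ex0, ez0⟩ := end_
  simp only
  -- normalized corners agree with min/max
  have hx1 : (if sx0 > ex0 then ex0 else sx0) = min sx0 ex0 := by
    simp only [min_def]; split_ifs <;> omega
  have hx2 : (if sx0 > ex0 then sx0 else ex0) = max sx0 ex0 := by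
    simp only [max_def]; split_ifs <;> omega
  have hz1 : (if sz0 > ez0 then ez0 else sz0) = min sz0 ez0 := by
    simp only [min_def]; split_ifs <;> omega
  have hz2 : (if sz0 > ez0 then sz0 else ez0) = max sz0 ez0 := by
    simp only [max_def]; split_ifs <;> omega
  rw [hx1, hx2, hz1, hz2]
  set sx := min sx0 ex0 with hsx
  set ex := max sx0 ex0 with hex
  set sz := min sz0 ez0 with hsz
  set ez := max sz0 ez0 with hez
  have hxle : sx ≤ ex := min_le_max
  have hzle : sz ≤ ez := min_le_max
  -- the dead empty-range branches never fire
  have hxne : PySem.List.pyRange 0 (ex - sx + 1) 1 ≠ [] := by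
    rw [PySem.List.pyRange_one_cons (by omega)]; simp
  have hzne : PySem.List.pyRange 0 (ez - sz + 1) 1 ≠ [] := by
    rw [PySem.List.pyRange_one_cons (by omega)]; simp
  rw [if_neg hxne, if_neg hzne]
  have hn : ex - sx + 1 = ((ex - sx + 1).toNat : Int) := by omega
  rw [hn]
  exact block_eq sx sz (ez - sz + 1) (by omega) (ex - sx + 1).toNat
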